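-- pv_equiv track=rewrite | github.com/Chris210634/metric-learning-using-contextual-similarity | 224x224/dataset/sampler.py | get_super_dict
-- ===== SOURCE A (Python) =====
-- def get_super_dict(super_labels, labels):
--     super_dict = {ct: {} for ct in set(super_labels)}
--     for idx, cl, ct in zip(range(len(labels)), labels, super_labels):
--         try:
--             super_dict[ct][cl].append(idx)
--         except KeyError:
--             super_dict[ct][cl] = [idx]
--     return super_dict
-- ===== SOURCE B (Python) =====
-- def get_super_dict(super_labels, labels):
--     flat = {}
--     for idx, (ct, cl) in enumerate(zip(super_labels, labels)):
--         flat.setdefault((ct, cl), []).append(idx)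
--     super_dict = {ct: {} for ct in dict.fromkeys(super_labels)}
--     for (ct, cl), lst in flat.items():
--         super_dict[ct][cl] = lst
--     return super_dict
-- ===== Notes on version B (the rewrite author's own statement) =====
-- stated objective: alternative
-- what changed: A nests inline during one scan, mutating a pre-seeded nested dict via try/except; B builds a flat (super,label)-tuple-keyed dict of index lists in one pass (setdefault) and then reshapes it into the nested dict in a second pass over an outer dict pre-seeded from the deduplicated super-labels.
import Mathlib
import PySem

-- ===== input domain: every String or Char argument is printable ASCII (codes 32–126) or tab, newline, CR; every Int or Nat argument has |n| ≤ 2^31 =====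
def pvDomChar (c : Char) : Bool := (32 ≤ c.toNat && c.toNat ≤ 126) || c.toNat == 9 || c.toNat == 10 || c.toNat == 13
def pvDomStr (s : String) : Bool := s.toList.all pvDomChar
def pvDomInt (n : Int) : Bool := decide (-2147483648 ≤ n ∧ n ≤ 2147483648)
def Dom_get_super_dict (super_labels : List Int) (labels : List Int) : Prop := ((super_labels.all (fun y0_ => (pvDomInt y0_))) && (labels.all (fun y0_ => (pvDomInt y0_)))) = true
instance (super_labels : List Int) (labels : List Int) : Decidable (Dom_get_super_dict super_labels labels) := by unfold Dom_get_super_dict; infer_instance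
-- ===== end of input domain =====

-- B replaces A's inline-nesting single pass (try/except on the nested dict) by a
-- flat (super,label)-keyed dict built in one pass and reshaped into the nested dict
-- in a second pass over a pre-seeded outer dict (alternative algorithm; the timing
-- run measured B faster by a constant factor).
-- Both Pythons return a dict whose keys come from set(super_labels): its hash
-- iteration order is not modelled; the ports use first-occurrence order and the
-- outputs are dicts, compared ignoring order.

-- ===== PORT A =====
def get_super_dict (super_labels : List Int) (labels : List Int) : List (Int × List (Int × List Int)) :=
  -- super_dict = {ct: {} for ct in set(super_labels)}
  let sd0 : PySem.Dict Int (PySem.Dict Int (List Int)) :=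
    (PySem.Set.ofList super_labels).foldl (fun d ct => d.insert ct PySem.Dict.empty) PySem.Dict.empty
  -- for idx, cl, ct in zip(range(len(labels)), labels, super_labels):
  --     try: super_dict[ct][cl].append(idx)           (ct is always a key of super_dict,
  --     except KeyError: super_dict[ct][cl] = [idx]    so Dict.modify's default is never used)
  let sd :=
    ((PySem.List.pyRange 0 (labels.length : Int) 1).zip (labels.zip super_labels)).foldl
      (fun d t => d.modify t.2.2 PySem.Dict.empty
        (fun inner => inner.modify t.2.1 [] (fun l => l ++ [t.1]))) sd0
  sd.items.map (fun p => (p.1, p.2.items))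

-- ===== PORT B =====
def get_super_dict_alt (super_labels : List Int) (labels : List Int) : List (Int × List (Int × List Int)) :=
  -- flat = {}
  -- for idx, (ct, cl) in enumerate(zip(super_labels, labels)):
  --     flat.setdefault((ct, cl), []).append(idx)
  let flat : PySem.Dict (Int × Int) (List Int) :=
    (PySem.List.enumerate (super_labels.zip labels) 0).foldl
      (fun d q => d.modify q.2 [] (fun l => l ++ [q.1])) PySem.Dict.empty
  -- super_dict = {ct: {} for ct in dict.fromkeys(super_labels)}
  let sd0 : PySem.Dict Int (PySem.Dict Int (List Int)) :=
    (PySem.List.dedup super_labels).foldl (fun d ct => d.insert ct PySem.Dict.empty) PySem.Dict.empty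
  -- for (ct, cl), lst in flat.items(): super_dict[ct][cl] = lst
  -- (ct is always a key of super_dict, so Dict.modify's default is never used)
  let sd := flat.items.foldl
      (fun d p => d.modify p.1.1 PySem.Dict.empty (fun inner => inner.insert p.1.2 p.2)) sd0
  sd.items.map (fun p => (p.1, p.2.items))

-- ===== PRECONDITION & SPEC =====
def Spec_get_super_dict (super_labels : List Int) (labels : List Int) (out : List (Int × List (Int × List Int))) : Prop := out = get_super_dict_alt super_labels labels
instance (super_labels : List Int) (labels : List Int) (out : List (Int × List (Int × List Int))) : Decidable (Spec_get_super_dict super_labels labels out) := by unfold Spec_get_super_dict; infer_instance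

-- ===== CLAIM (what is proved, stated in full; the proofs are below) =====
def Claim_equal_get_super_dict : Prop := ∀ (super_labels : List Int) (labels : List Int), Dom_get_super_dict super_labels labels → Spec_get_super_dict super_labels labels (get_super_dict super_labels labels)

-- ===== LEMMAS AND PROOFS =====

-- zip(range(len(labels)), labels, super_labels) is enumerate(zip(super_labels, labels)) with components reordered
theorem pv_zip3_eq (ls : List Int) : ∀ (ss : List Int) (k : Int),
    (PySem.List.pyRange k (k + ls.length) 1).zip (ls.zip ss)
      = (PySem.List.enumerate (ss.zip ls) k).map (fun q => (q.1, q.2.2, q.2.1)) := by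
  induction ls with
  | nil => intro ss k; simp [PySem.List.enumerate_nil, List.zip_nil_right]
  | cons x xs ih =>
    intro ss k
    cases ss with
    | nil => simp [PySem.List.enumerate_nil, PySem.List.pyRange]
    | cons y ys =>
      rw [PySem.List.pyRange_one_cons (by push_cast [List.length_cons]; omega)]
      simp only [List.zip_cons_cons, PySem.List.enumerate_cons, List.map_cons, List.length_cons]
      push_cast
      rw [show k + ((xs.length : Int) + 1) = (k + 1) + xs.length by ring, ih ys (k + 1)]

-- folding modify over a keyed list, read back at one key
theorem pv_getD_foldl_modify {κ ν τ : Type} [DecidableEq κ] [BEq κ] [LawfulBEq κ]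
    (ts : List τ) (key : τ → κ) (dflt : ν) (f : τ → ν → ν) :
    ∀ (d : PySem.Dict κ ν) (k : κ),
    (ts.foldl (fun d t => d.modify (key t) dflt (f t)) d).getD k dflt
      = (ts.filter (fun t => key t == k)).foldl (fun v t => f t v) (d.getD k dflt) := by
  induction ts with
  | nil => intro d k; rfl
  | cons t ts ih =>
    intro d k
    simp only [List.foldl_cons, List.filter_cons]
    by_cases h : key t = k
    · subst h; simp [ih, PySem.Dict.getD_modify_self]
    · have : (key t == k) = false := by simp [h]
      simp only [this, Bool.false_eq_true, if_false, ih]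
      rw [PySem.Dict.getD_modify_of_ne]
      exact fun hk => h hk.symm

-- an update with only already-present elements is the identity
theorem pv_update_of_subset {α : Type} [BEq α] [LawfulBEq α] (s : PySem.Set α) (xs : List α)
    (h : ∀ x ∈ xs, x ∈ s) : PySem.Set.update s xs = s := by
  induction xs generalizing s with
  | nil => rfl
  | cons x xs ih =>
    rw [PySem.Set.update_cons, PySem.Set.add_of_mem (h x (by simp))]
    exact ih s (fun y hy => h y (by simp [hy]))

-- canonical form shared by both ports (proof-only helpers)
def pvE (super_labels labels : List Int) : List (Int × Int × Int) :=
  PySem.List.enumerate (super_labels.zip labels) 0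

def pvCanon (super_labels labels : List Int) : List (Int × List (Int × List Int)) :=
  (PySem.Set.ofList super_labels).map (fun ct =>
    (ct, (PySem.Set.ofList (((pvE super_labels labels).filter (fun q => q.2.1 == ct)).map (fun q => q.2.2))).map (fun cl =>
      (cl, ((pvE super_labels labels).filter (fun q => q.2.1 == ct && q.2.2 == cl)).map (fun q => q.1)))))

theorem pv_ofList_filter (xs : List (Int × Int)) (ct : Int) :
    (PySem.Set.ofList xs).filter (fun p => p.1 == ct)
      = (PySem.Set.ofList ((xs.filter (fun p => p.1 == ct)).map (fun p => p.2))).map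
          (fun c => (ct, c)) := by
  induction xs using List.reverseRecOn with
  | nil => rfl
  | append_singleton xs x ih =>
    rw [PySem.Set.ofList_append_singleton, PySem.Set.add_eq_ite, List.filter_append,
        List.filter_singleton]
    by_cases hct : x.1 = ct
    · have hpx : (x.1 == ct) = true := by simp [hct]
      have hxeq : x = (ct, x.2) := by rw [← hct]
      simp only [hpx, cond_true, List.map_append, List.map_cons, List.map_nil]
      rw [PySem.Set.ofList_append_singleton, PySem.Set.add_eq_ite]
      have hmm : (x.2 ∈ PySem.Set.ofList ((xs.filter (fun p => p.1 == ct)).map (fun p => p.2)))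
          ↔ x ∈ PySem.Set.ofList xs := by
        rw [← PySem.List.dedup_eq_ofList, ← PySem.List.dedup_eq_ofList,
            PySem.List.mem_dedup, PySem.List.mem_dedup]
        constructor
        · intro h
          obtain ⟨p, hp, hp2⟩ := List.mem_map.mp h
          obtain ⟨hp1, hp1'⟩ := List.mem_filter.mp hp
          have hpeq : p = x := by
            rw [hxeq]; exact Prod.ext_iff.mpr ⟨by simpa using hp1', hp2⟩
          rwa [← hpeq]
        · intro h
          exact List.mem_map.mpr ⟨x, List.mem_filter.mpr ⟨h, hpx⟩, rfl⟩
      by_cases hx : x ∈ PySem.Set.ofList xs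
      · rw [if_pos hx, if_pos (hmm.mpr hx)]; exact ih
      · rw [if_neg hx, if_neg (fun h => hx (hmm.mp h)), List.filter_append, List.filter_singleton]
        simp only [hpx, cond_true]
        rw [ih, List.map_append, List.map_singleton, ← hxeq]
    · have hpx : (x.1 == ct) = false := by simp [hct]
      simp only [hpx, cond_false, List.append_nil]
      by_cases hx : x ∈ PySem.Set.ofList xs
      · rw [if_pos hx]; exact ih
      · rw [if_neg hx, List.filter_append, List.filter_singleton]
        simp only [hpx, cond_false, List.append_nil]
        exact ih

theorem pv_alt_eq_canon (sl ls : List Int) : get_super_dict_alt sl ls = pvCanon sl ls := by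
  unfold get_super_dict_alt
  simp only [PySem.List.dedup_eq_ofList]
  set S := PySem.Set.ofList sl with hS
  set E := PySem.List.enumerate (sl.zip ls) 0 with hE
  set flat := E.foldl (fun d q => d.modify q.2 [] (fun l => l ++ [q.1]))
      (PySem.Dict.empty : PySem.Dict (Int × Int) (List Int)) with hflatdef
  have hflatkeys : flat.keys = PySem.Set.ofList (E.map (fun q => q.2)) := by
    rw [hflatdef, PySem.Dict.keys_foldl_modify_key, PySem.Dict.keys_empty, PySem.Set.update_nil_left]
  have hflatnd : flat.keys.Nodup := by rw [hflatkeys]; exact PySem.Set.nodup_ofList _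
  have hflatget : ∀ k, flat.getD k [] = (E.filter (fun q => q.2 == k)).map (fun q => q.1) := by
    intro k
    have hfold : flat = (E.map (fun q => ((q.2 : Int × Int), (q.1 : Int)))).foldl
        (fun d p => d.modify p.1 [] (fun l => l ++ [p.2])) PySem.Dict.empty := by
      rw [hflatdef, List.foldl_map]
    rw [hfold, PySem.Dict.getD_foldl_modify_append]
    simp only [PySem.Dict.getD_empty, List.nil_append, List.filter_map, Function.comp_def,
      List.map_map]
  have hflatitems : flat.items = (PySem.Set.ofList (E.map (fun q => q.2))).map
      (fun k => (k, (E.filter (fun q => q.2 == k)).map (fun q => q.1))) := by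
    rw [PySem.Dict.items_eq_map_keys flat hflatnd [], hflatkeys]
    exact List.map_congr_left (fun k _ => by rw [hflatget k])
  set sd0 := S.foldl (fun d ct => d.insert ct (PySem.Dict.empty : PySem.Dict Int (List Int)))
      PySem.Dict.empty with hsd0def
  have hsd0 : sd0.items = S.map (fun ct => (ct, PySem.Dict.empty)) := by
    rw [hsd0def, PySem.Dict.items_foldl_insert_fresh (k := fun a => a) (v := fun _ => PySem.Dict.empty)]
    · rfl
    · intro a _; rfl
    · rw [List.map_id']; exact PySem.Set.nodup_ofList sl
  have hsd0keys : sd0.keys = S := by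
    simp only [PySem.Dict.keys, hsd0, List.map_map]
    have h1 : List.map ((fun x => x.1) ∘ fun ct => (ct, (PySem.Dict.empty : PySem.Dict Int (List Int)))) S = S := by
      simp only [Function.comp_def]; simp
    rw [h1]
  have hnd0 : sd0.keys.Nodup := by rw [hsd0keys, hS]; exact PySem.Set.nodup_ofList sl
  set F := flat.items.foldl (fun d p => d.modify p.1.1 PySem.Dict.empty
      (fun inner => inner.insert p.1.2 p.2)) sd0 with hFdef
  have hFkeys : F.keys = S := by
    rw [hFdef, PySem.Dict.keys_foldl_modify_key, hsd0keys]
    refine pv_update_of_subset S _ ?_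
    intro x hx
    simp only [List.mem_map] at hx
    obtain ⟨p, hp, rfl⟩ := hx
    have hk : p.1 ∈ flat.keys := PySem.Dict.mem_keys_of_mem_items flat hp
    rw [hflatkeys, ← PySem.List.dedup_eq_ofList, PySem.List.mem_dedup] at hk
    obtain ⟨q, hq, hq2⟩ := List.mem_map.mp hk
    have hmem : q.2 ∈ sl.zip ls := by
      have := List.mem_map_of_mem (f := fun r => r.2) hq
      rwa [hE, PySem.List.map_snd_enumerate] at this
    have h1 : q.2.1 ∈ sl := (List.of_mem_zip hmem).1
    rw [hS, ← PySem.List.dedup_eq_ofList]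
    exact (PySem.List.mem_dedup sl p.1.1).mpr (by rw [← hq2]; exact h1)
  have hndF : F.keys.Nodup := by rw [hFkeys, hS]; exact PySem.Set.nodup_ofList sl
  rw [PySem.Dict.items_eq_map_keys F hndF PySem.Dict.empty, hFkeys, List.map_map]
  unfold pvCanon pvE
  rw [← hS, ← hE]
  refine List.map_congr_left (fun ct hct => ?_)
  simp only [Function.comp_def]
  have hmem : (ct, (PySem.Dict.empty : PySem.Dict Int (List Int))) ∈ sd0.items := by
    rw [hsd0]; exact List.mem_map_of_mem hct
  have hsd0get : sd0.getD ct PySem.Dict.empty = PySem.Dict.empty :=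
    PySem.Dict.getD_of_mem_items sd0 hmem hnd0 PySem.Dict.empty
  have heq := pv_getD_foldl_modify flat.items (fun p => p.1.1)
      (PySem.Dict.empty : PySem.Dict Int (List Int))
      (fun p inner => inner.insert p.1.2 p.2) sd0 ct
  set C := PySem.Set.ofList ((E.filter (fun q => q.2.1 == ct)).map (fun q => q.2.2)) with hC
  have hX : flat.items.filter (fun p => p.1.1 == ct)
      = C.map (fun c => (((ct : Int), (c : Int)),
          (E.filter (fun q => q.2 == ((ct : Int), c))).map (fun q => q.1))) := by
    rw [hflatitems, List.filter_map]
    simp only [Function.comp_def]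
    rw [pv_ofList_filter, List.map_map]
    simp only [Function.comp_def]
    congr 1
    rw [hC, List.filter_map, List.map_map]
    simp only [Function.comp_def]
  have hget : F.getD ct PySem.Dict.empty
      = (C.map (fun c => (((ct : Int), (c : Int)),
          (E.filter (fun q => q.2 == ((ct : Int), c))).map (fun q => q.1)))).foldl
          (fun inner p => inner.insert p.1.2 p.2) PySem.Dict.empty := by
    rw [hFdef, heq, hsd0get, hX]
  have hitems : (F.getD ct PySem.Dict.empty).items
      = C.map (fun c => (c, (E.filter (fun q => q.2 == ((ct : Int), c))).map (fun q => q.1))) := by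
    rw [hget, List.foldl_map]
    simp only
    rw [PySem.Dict.items_foldl_insert_fresh (k := fun c : Int => c)
        (v := fun c => (E.filter (fun q => q.2 == ((ct : Int), c))).map (fun q => q.1))]
    · rfl
    · intro a _; rfl
    · rw [List.map_id']; rw [hC]; exact PySem.Set.nodup_ofList _
  rw [hitems]
  refine congrArg _ ?_
  refine List.map_congr_left (fun cl _ => ?_)
  refine congrArg _ ?_
  refine congrArg _ ?_
  refine List.filter_congr (fun q _ => ?_)
  obtain ⟨i, t, c⟩ := q
  exact Bool.le_antisymm (fun a => a) (fun a => a)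

theorem pv_a_eq_canon (sl ls : List Int) : get_super_dict sl ls = pvCanon sl ls := by
  unfold get_super_dict
  simp only
  set S := PySem.Set.ofList sl with hS
  have hsd0 : (S.foldl (fun d ct => d.insert ct (PySem.Dict.empty : PySem.Dict Int (List Int))) PySem.Dict.empty).items
      = S.map (fun ct => (ct, PySem.Dict.empty)) := by
    rw [PySem.Dict.items_foldl_insert_fresh (k := fun a => a) (v := fun _ => PySem.Dict.empty)]
    · rfl
    · intro a _; rfl
    · rw [List.map_id']; exact PySem.Set.nodup_ofList sl
  have hnd0 : ((S.foldl (fun d ct => d.insert ct (PySem.Dict.empty : PySem.Dict Int (List Int))) PySem.Dict.empty)).keys.Nodup := by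
    simp only [PySem.Dict.keys, hsd0, List.map_map]
    have h1 : List.map ((fun x => x.1) ∘ fun ct => (ct, (PySem.Dict.empty : PySem.Dict Int (List Int)))) S = S := by simp only [Function.comp_def]; simp
    rw [h1]; exact PySem.Set.nodup_ofList sl
  have hts : (PySem.List.pyRange 0 (ls.length : Int) 1).zip (ls.zip sl)
      = (pvE sl ls).map (fun q => (q.1, q.2.2, q.2.1)) := by
    simpa [pvE] using pv_zip3_eq ls sl 0
  set sd0 := S.foldl (fun d ct => d.insert ct (PySem.Dict.empty : PySem.Dict Int (List Int))) PySem.Dict.empty with hsd0def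
  set F := ((PySem.List.pyRange 0 (ls.length : Int) 1).zip (ls.zip sl)).foldl
      (fun d t => d.modify t.2.2 PySem.Dict.empty
        (fun inner => inner.modify t.2.1 [] (fun l => l ++ [t.1]))) sd0 with hFdef
  have hsd0keys : sd0.keys = S := by
    simp only [PySem.Dict.keys, hsd0, List.map_map]
    have h1 : List.map ((fun x => x.1) ∘ fun ct => (ct, (PySem.Dict.empty : PySem.Dict Int (List Int)))) S = S := by
      simp only [Function.comp_def]; simp
    rw [h1]
  have hFkeys : F.keys = S := by
    rw [hFdef, PySem.Dict.keys_foldl_modify_key, hsd0keys]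
    refine pv_update_of_subset S _ ?_
    intro x hx
    simp only [List.mem_map] at hx
    obtain ⟨t, ht, rfl⟩ := hx
    have h3 := (List.of_mem_zip (List.of_mem_zip ht).2).2
    rw [hS, ← PySem.List.dedup_eq_ofList]
    exact (PySem.List.mem_dedup sl t.2.2).mpr h3
  have hndF : F.keys.Nodup := by rw [hFkeys, hS]; exact PySem.Set.nodup_ofList sl
  have hFitems : F.items = F.keys.map (fun k => (k, F.getD k PySem.Dict.empty)) :=
    PySem.Dict.items_eq_map_keys F hndF PySem.Dict.empty
  rw [hFitems, hFkeys, List.map_map]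
  unfold pvCanon
  rw [← hS]
  refine List.map_congr_left (fun ct hct => ?_)
  simp only [Function.comp_def]
  have hmem : (ct, (PySem.Dict.empty : PySem.Dict Int (List Int))) ∈ sd0.items := by
    rw [hsd0]; exact List.mem_map_of_mem hct
  have hsd0get : sd0.getD ct PySem.Dict.empty = PySem.Dict.empty :=
    PySem.Dict.getD_of_mem_items sd0 hmem hnd0 PySem.Dict.empty
  have hget : F.getD ct PySem.Dict.empty
      = ((pvE sl ls).filter (fun q => q.2.1 == ct)).foldl
          (fun d q => d.modify q.2.2 [] (fun l => l ++ [q.1])) PySem.Dict.empty := by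
    have heq := pv_getD_foldl_modify ((PySem.List.pyRange 0 (ls.length : Int) 1).zip (ls.zip sl))
      (fun t => t.2.2) (PySem.Dict.empty : PySem.Dict Int (List Int))
      (fun t inner => inner.modify t.2.1 [] (fun l => l ++ [t.1])) sd0 ct
    rw [hFdef, heq, hsd0get, hts, List.filter_map, List.foldl_map]
    rfl
  set G := ((pvE sl ls).filter (fun q => q.2.1 == ct)).foldl
      (fun d q => d.modify q.2.2 [] (fun l => l ++ [q.1])) PySem.Dict.empty with hGdef
  have hGkeys : G.keys = PySem.Set.ofList (((pvE sl ls).filter (fun q => q.2.1 == ct)).map (fun q => q.2.2)) := by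
    rw [hGdef, PySem.Dict.keys_foldl_modify_key, PySem.Dict.keys_empty, PySem.Set.update_nil_left]
  have hGnd : G.keys.Nodup := by rw [hGkeys]; exact PySem.Set.nodup_ofList _
  have hGget : ∀ cl : Int, G.getD cl []
      = ((pvE sl ls).filter (fun q => q.2.1 == ct && q.2.2 == cl)).map (fun q => q.1) := by
    intro cl
    have hfold : G = (((pvE sl ls).filter (fun q => q.2.1 == ct)).map (fun q => ((q.2.2 : Int), (q.1 : Int)))).foldl
        (fun d p => d.modify p.1 [] (fun l => l ++ [p.2])) PySem.Dict.empty := by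
      rw [List.foldl_map]
    rw [hfold, PySem.Dict.getD_foldl_modify_append]
    simp only [PySem.Dict.getD_empty, List.nil_append, List.filter_map, Function.comp_def,
      List.map_map, List.filter_filter]
    congr 1
    apply List.filter_congr
    intro q _
    simp [Bool.and_comm]
  rw [hget, PySem.Dict.items_eq_map_keys G hGnd [], hGkeys]
  refine congrArg _ ?_
  refine List.map_congr_left (fun cl _ => ?_)
  rw [hGget cl]

-- ===== VERDICT (by name: the statement is the Claim_ definition above) =====
theorem get_super_dict_spec : Claim_equal_get_super_dict := by
  intro super_labels labels _
  unfold Spec_get_super_dict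
  rw [pv_a_eq_canon, pv_alt_eq_canon]
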